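-- pv_equiv track=rewrite | github.com/KostovskaAna/GNN4PerformancePrediction | utils_inductive.py | get_encoded_problem_instances
-- ===== SOURCE A (Python) =====
-- def get_encoded_problem_instances(list, offset=0):
--     problem_dict = {}
--     encoded_problems = []
--     for problem in list:
--         if problem not in problem_dict:
--             problem_dict[problem] = len(problem_dict)+offset
--         encoded_problems.append(problem_dict[problem])
--     return encoded_problems, problem_dict
-- ===== SOURCE B (Python) =====
-- def get_encoded_problem_instances(list, offset=0):
--     # id of an element = offset + number of distinct elements strictly before its
--     # first occurrence; computed directly per element, no incremental counter dict.
--     encoded_problems = [offset + len(set(list[:list.index(p)])) for p in list]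
--     # duplicates re-insert the same key with the same value, so first-appearance
--     # order and values are preserved
--     problem_dict = {p: e for p, e in zip(list, encoded_problems)}
--     return encoded_problems, problem_dict
-- ===== Notes on version B (the rewrite author's own statement) =====
-- stated objective: alternative
-- what changed: B computes each id arithmetically as offset plus the count of distinct elements before the element's first occurrence (len(set(prefix))), instead of A's incremental membership-check-and-assign dict loop; the dict is then rebuilt from the zipped pairs.
import Mathlib
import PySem

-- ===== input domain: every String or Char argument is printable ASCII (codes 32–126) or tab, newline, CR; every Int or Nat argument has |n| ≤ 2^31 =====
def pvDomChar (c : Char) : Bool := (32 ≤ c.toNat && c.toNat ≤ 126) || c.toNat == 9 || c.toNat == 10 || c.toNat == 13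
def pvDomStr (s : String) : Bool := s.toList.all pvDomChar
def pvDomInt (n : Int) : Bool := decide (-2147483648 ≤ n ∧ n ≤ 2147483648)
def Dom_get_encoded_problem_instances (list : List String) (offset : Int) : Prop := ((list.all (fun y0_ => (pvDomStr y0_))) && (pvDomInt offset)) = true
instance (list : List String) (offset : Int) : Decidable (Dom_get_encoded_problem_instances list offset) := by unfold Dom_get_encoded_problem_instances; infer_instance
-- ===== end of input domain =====

-- B computes each id directly as offset + number of distinct elements before the element's
-- first occurrence, instead of A's incremental membership-check-and-assign dict loop
-- (objective: alternative; B is quadratic, not faster).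

-- ===== PORT A =====
-- the trailing 'getD p 0' ports 'problem_dict[problem]': p is always present there, the default is unreachable
def pvGoA (offset : Int) : List String → PySem.Dict String Int → List Int → List Int × (List (String × Int))
  | [], d, enc => (enc, d.items)
  | p :: rest, d, enc =>
    let d' := if d.contains p = false then d.insert p ((d.size : Int) + offset) else d
    pvGoA offset rest d' (enc ++ [d'.getD p 0])

def get_encoded_problem_instances (list : List String) (offset : Int) : List Int × (List (String × Int)) :=
  pvGoA offset list PySem.Dict.empty []

-- ===== PORT B =====
-- 'offset + len(set(list[:list.index(p)]))'; list[:j] with j = list.index(p) ≥ 0 is 'take j';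
-- the 'none' branch is unreachable (p is drawn from list, Python's list.index never raises here)
def pvRankB (list : List String) (offset : Int) (p : String) : Int :=
  match PySem.List.index? list p with
  | some j => offset + ((PySem.Set.ofList (list.take j)).length : Int)
  | none => 0

def get_encoded_problem_instances_alt (list : List String) (offset : Int) : List Int × (List (String × Int)) :=
  let enc := list.map (fun p => pvRankB list offset p)
  let d := (list.zip enc).foldl (fun d q => d.insert q.1 q.2) (PySem.Dict.empty : PySem.Dict String Int)
  (enc, d.items)

-- ===== PRECONDITION & SPEC =====
def Spec_get_encoded_problem_instances (list : List String) (offset : Int) (out : List Int × (List (String × Int))) : Prop := out = get_encoded_problem_instances_alt list offset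
instance (list : List String) (offset : Int) (out : List Int × (List (String × Int))) : Decidable (Spec_get_encoded_problem_instances list offset out) := by unfold Spec_get_encoded_problem_instances; infer_instance

-- ===== CLAIM (what is proved, stated in full; the proofs are below) =====
def Claim_equal_get_encoded_problem_instances : Prop := ∀ (list : List String) (offset : Int), Dom_get_encoded_problem_instances list offset → Spec_get_encoded_problem_instances list offset (get_encoded_problem_instances list offset)

-- ===== LEMMAS AND PROOFS =====

-- A's dict-updating step and its fold over the whole list
def pvStepA (offset : Int) (d : PySem.Dict String Int) (p : String) : PySem.Dict String Int :=
  if d.contains p = false then d.insert p ((d.size : Int) + offset) else d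

def pvFoldA (offset : Int) (l : List String) (d : PySem.Dict String Int) : PySem.Dict String Int :=
  l.foldl (pvStepA offset) d

-- the common characterisation: id table = enumerate(dedup) shifted by offset
def pvT (offset : Int) (xs : List String) : List (String × Int) :=
  (PySem.List.enumerate (PySem.List.dedup xs)).map (fun q => (q.2, q.1 + offset))

lemma pvStepA_contains (offset : Int) (d : PySem.Dict String Int) (p q : String)
    (h : d.contains q = true) : (pvStepA offset d p).contains q = true := by
  unfold pvStepA
  split
  · simp [PySem.Dict.contains_insert, h]
  · exact h

lemma pvFoldA_getD_of_contains (offset : Int) (l : List String) (d : PySem.Dict String Int)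
    (p : String) (h : d.contains p = true) :
    (pvFoldA offset l d).getD p 0 = d.getD p 0 := by
  induction l generalizing d with
  | nil => rfl
  | cons q l ih =>
    have hc : (pvStepA offset d q).contains p = true := pvStepA_contains offset d q p h
    have := ih (pvStepA offset d q) hc
    rw [pvFoldA, List.foldl_cons, ← pvFoldA, this]
    unfold pvStepA
    split
    · rename_i hq
      have hne : p ≠ q := by
        intro e; subst e; rw [h] at hq; cases hq
      rw [PySem.Dict.getD_insert]
      simp [hne]
    · rfl

lemma pvGoA_spec (offset : Int) (l : List String) (d : PySem.Dict String Int) (enc : List Int) :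
    pvGoA offset l d enc
      = (enc ++ l.map (fun p => (pvFoldA offset l d).getD p 0), (pvFoldA offset l d).items) := by
  induction l generalizing d enc with
  | nil => simp [pvGoA, pvFoldA]
  | cons p l ih =>
    have hfold : pvFoldA offset (p :: l) d = pvFoldA offset l (pvStepA offset d p) := by
      rw [pvFoldA, List.foldl_cons]; rfl
    have hcont : (pvStepA offset d p).contains p = true := by
      unfold pvStepA
      split
      · exact PySem.Dict.contains_insert_self _ _ _
      · rename_i hq
        cases hv : d.contains p
        · exact absurd hv hq
        · rfl
    have hpers := pvFoldA_getD_of_contains offset l (pvStepA offset d p) p hcont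
    show pvGoA offset l (if d.contains p = false then d.insert p ((d.size : Int) + offset) else d)
        (enc ++ [(if d.contains p = false then d.insert p ((d.size : Int) + offset) else d).getD p 0]) = _
    rw [show (if d.contains p = false then d.insert p ((d.size : Int) + offset) else d) = pvStepA offset d p from rfl]
    rw [ih (pvStepA offset d p) (enc ++ [(pvStepA offset d p).getD p 0])]
    rw [hfold, List.map_cons, hpers]
    simp

lemma pvT_keys (offset : Int) (xs : List String) :
    (pvT offset xs).map Prod.fst = PySem.List.dedup xs := by
  unfold pvT
  rw [List.map_map]
  exact PySem.List.map_snd_enumerate _ _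

lemma pvDedup_snoc (xs : List String) (p : String) :
    PySem.List.dedup (xs ++ [p])
      = if p ∈ xs then PySem.List.dedup xs else PySem.List.dedup xs ++ [p] := by
  simp only [PySem.List.dedup_eq_ofList, PySem.Set.ofList_eq_foldl, List.foldl_append, List.foldl_cons, List.foldl_nil]
  rw [← PySem.Set.ofList_eq_foldl]
  show PySem.Set.add (PySem.Set.ofList xs) p = _
  unfold PySem.Set.add
  by_cases hm : p ∈ xs
  · simp [PySem.Set.contains, hm, PySem.Set.mem_ofList]
  · simp [PySem.Set.contains, hm, PySem.Set.mem_ofList]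

lemma pvT_snoc_not_mem (offset : Int) (xs : List String) (p : String) (hm : p ∉ xs) :
    pvT offset (xs ++ [p]) = pvT offset xs ++ [(p, ((PySem.List.dedup xs).length : Int) + offset)] := by
  unfold pvT
  rw [pvDedup_snoc, if_neg hm, PySem.List.enumerate_append, List.map_append]
  simp [PySem.List.enumerate]

lemma pvT_snoc_mem (offset : Int) (xs : List String) (p : String) (hm : p ∈ xs) :
    pvT offset (xs ++ [p]) = pvT offset xs := by
  unfold pvT
  rw [pvDedup_snoc, if_pos hm]

lemma pvT_nodup_keys (offset : Int) (xs : List String) :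
    (PySem.Dict.mk (pvT offset xs)).keys.Nodup := by
  show ((pvT offset xs).map Prod.fst).Nodup
  rw [pvT_keys]
  exact PySem.List.nodup_dedup _

lemma pvT_mem_key (offset : Int) (xs : List String) (p : String) (hp : p ∈ xs) :
    ∃ w, (p, w) ∈ pvT offset xs := by
  have : p ∈ (pvT offset xs).map Prod.fst := by
    rw [pvT_keys]
    exact (PySem.List.mem_dedup _ _).2 hp
  rcases List.mem_map.1 this with ⟨q, hq, he⟩
  exact ⟨q.2, by rwa [show (p, q.2) = q from by cases q; simp_all]⟩

-- central lemma: lookup in the table = B's directly computed rank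
lemma pvT_getD (offset : Int) (xs : List String) (p : String) (hp : p ∈ xs) :
    (PySem.Dict.mk (pvT offset xs)).getD p 0 = pvRankB xs offset p := by
  induction xs using List.reverseRecOn with
  | nil => cases hp
  | append_singleton xs x ih =>
    by_cases hx : p ∈ xs
    · -- rank in xs ++ [x] = rank in xs
      obtain ⟨j, hj⟩ := (PySem.List.index?_isSome_iff xs p).2 hx |> Option.isSome_iff_exists.1
      have hidx : PySem.List.index? (xs ++ [x]) p = some j := by
        rw [PySem.List.index?_append_of_mem _ hx, hj]
      obtain ⟨pre, suf, hxs, hlen, _⟩ := (PySem.List.index?_eq_some_iff _ _ _).1 hj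
      have hjle : j ≤ xs.length := by
        subst hlen; rw [hxs]; simp
      have htake : (xs ++ [x]).take j = xs.take j := List.take_append_of_le_length hjle
      have hrank : pvRankB (xs ++ [x]) offset p = pvRankB xs offset p := by
        simp only [pvRankB, hidx, hj, htake]
      rw [hrank, ← ih hx]
      -- lookup unchanged by the (possible) appended fresh entry
      obtain ⟨w, hw⟩ := pvT_mem_key offset xs p hx
      have h1 : (PySem.Dict.mk (pvT offset xs)).getD p 0 = w :=
        PySem.Dict.getD_of_mem_items _ hw (pvT_nodup_keys offset xs) 0
      have hw' : (p, w) ∈ pvT offset (xs ++ [x]) := by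
        by_cases hxm : x ∈ xs
        · rw [pvT_snoc_mem offset xs x hxm]; exact hw
        · rw [pvT_snoc_not_mem offset xs x hxm]; exact List.mem_append_left _ hw
      have h2 : (PySem.Dict.mk (pvT offset (xs ++ [x]))).getD p 0 = w :=
        PySem.Dict.getD_of_mem_items _ hw' (pvT_nodup_keys offset (xs ++ [x])) 0
      rw [h1, h2]
    · -- p is the freshly appended element
      have hpx : p = x := by
        rcases List.mem_append.1 hp with h | h
        · exact absurd h hx
        · simpa using h
      subst hpx
      have hidx : PySem.List.index? (xs ++ [p]) p = some xs.length :=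
        PySem.List.index?_append_singleton_self xs p hx
      have hrank : pvRankB (xs ++ [p]) offset p
          = offset + ((PySem.List.dedup xs).length : Int) := by
        simp only [pvRankB, hidx, List.take_left, ← PySem.List.dedup_eq_ofList]
      have hmem : (p, ((PySem.List.dedup xs).length : Int) + offset) ∈ pvT offset (xs ++ [p]) := by
        rw [pvT_snoc_not_mem offset xs p hx]
        exact List.mem_append_right _ (by simp)
      have hv := PySem.Dict.getD_of_mem_items (PySem.Dict.mk (pvT offset (xs ++ [p]))) hmem
        (pvT_nodup_keys offset (xs ++ [p])) 0
      rw [hv, hrank]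
      ring

-- A's table over the whole list IS pvT (step-by-step, from the left, via snoc on the processed prefix)
lemma pvStepA_T (offset : Int) (xs : List String) (p : String) :
    pvStepA offset (PySem.Dict.mk (pvT offset xs)) p = PySem.Dict.mk (pvT offset (xs ++ [p])) := by
  have hkeys : (PySem.Dict.mk (pvT offset xs)).keys = PySem.List.dedup xs := by
    rw [PySem.Dict.keys_mk]
    exact pvT_keys offset xs
  have hcont : (PySem.Dict.mk (pvT offset xs)).contains p = decide (p ∈ xs) := by
    rw [PySem.Dict.contains_eq_decide_mem_keys, hkeys]
    simp
  by_cases hm : p ∈ xs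
  · unfold pvStepA
    rw [hcont, if_neg (by simp [hm]), pvT_snoc_mem offset xs p hm]
  · unfold pvStepA
    rw [hcont]
    simp only [hm, decide_false]
    rw [if_pos trivial]
    apply PySem.Dict.ext
    rw [PySem.Dict.items_insert_of_not_contains _ _ (by rw [hcont]; simp [hm])]
    rw [pvT_snoc_not_mem offset xs p hm]
    have hsize : (PySem.Dict.mk (pvT offset xs)).size = (PySem.List.dedup xs).length := by
      show (pvT offset xs).length = _
      simp [pvT, PySem.List.length_enumerate]
    rw [hsize]

lemma pvFoldA_T (offset : Int) (l xs : List String) :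
    pvFoldA offset l (PySem.Dict.mk (pvT offset xs)) = PySem.Dict.mk (pvT offset (xs ++ l)) := by
  induction l generalizing xs with
  | nil => simp [pvFoldA]
  | cons p l ih =>
    rw [pvFoldA, List.foldl_cons, ← pvFoldA, pvStepA_T, ih (xs ++ [p])]
    simp

-- B's insert loop: duplicate keys re-insert the same value, so the items are dedup-keyed
lemma pvFoldB_eval (xs : List String) (f : String → Int) :
    xs.foldl (fun d p => d.insert p (f p)) (PySem.Dict.empty : PySem.Dict String Int)
      = PySem.Dict.mk ((PySem.List.dedup xs).map (fun p => (p, f p))) := by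
  induction xs using List.reverseRecOn with
  | nil => rfl
  | append_singleton xs x ih =>
    rw [List.foldl_append, List.foldl_cons, List.foldl_nil, ih]
    have hkeys : (PySem.Dict.mk ((PySem.List.dedup xs).map (fun p => (p, f p)))).keys
        = PySem.List.dedup xs := by
      rw [PySem.Dict.keys_mk, List.map_map]
      simp [Function.comp_def]
    have hcont : (PySem.Dict.mk ((PySem.List.dedup xs).map (fun p => (p, f p)))).contains x
        = decide (x ∈ xs) := by
      rw [PySem.Dict.contains_eq_decide_mem_keys, hkeys]
      simp
    apply PySem.Dict.ext
    by_cases hm : x ∈ xs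
    · rw [PySem.Dict.items_insert_of_contains _ _ (by rw [hcont]; simp [hm])]
      show ((PySem.List.dedup xs).map (fun p => (p, f p))).map _ = _
      rw [pvDedup_snoc, if_pos hm, List.map_map]
      apply List.map_congr_left
      intro a _
      by_cases hax : a = x
      · subst hax; simp
      · simp [hax]
    · rw [PySem.Dict.items_insert_of_not_contains _ _ (by rw [hcont]; simp [hm])]
      show ((PySem.List.dedup xs).map (fun p => (p, f p))) ++ _ = _
      rw [pvDedup_snoc, if_neg hm, List.map_append]
      simp

lemma pvT_eq_map_rank (offset : Int) (list : List String) :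
    (PySem.List.dedup list).map (fun p => (p, pvRankB list offset p)) = pvT offset list := by
  have h := PySem.Dict.items_eq_map_keys (PySem.Dict.mk (pvT offset list))
    (pvT_nodup_keys offset list) 0
  have hkeys : (PySem.Dict.mk (pvT offset list)).keys = PySem.List.dedup list := by
    rw [PySem.Dict.keys_mk]; exact pvT_keys offset list
  rw [hkeys] at h
  have hitems : (PySem.Dict.mk (pvT offset list)).items = pvT offset list := rfl
  rw [hitems] at h
  rw [h]
  apply List.map_congr_left
  intro p hp
  have hpl : p ∈ list := (PySem.List.mem_dedup _ _).1 hp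
  rw [pvT_getD offset list p hpl]

-- the zip of a list with a map of itself is the map of the pairing
lemma pvZipSelfMap {a b : Type} (l : List a) (g : a → b) :
    l.zip (l.map g) = l.map (fun p => (p, g p)) := by
  have := @List.zip_map' a a b id g l
  simpa using this

-- ===== VERDICT (by name: the statement is the Claim_ definition above) =====
theorem get_encoded_problem_instances_spec : Claim_equal_get_encoded_problem_instances := by
  intro list offset _
  unfold Spec_get_encoded_problem_instances get_encoded_problem_instances get_encoded_problem_instances_alt
  have hA : pvFoldA offset list PySem.Dict.empty = PySem.Dict.mk (pvT offset list) := by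
    rw [show (PySem.Dict.empty : PySem.Dict String Int) = PySem.Dict.mk (pvT offset []) from rfl,
      pvFoldA_T]
    simp
  rw [pvGoA_spec, hA]
  simp only [List.nil_append]
  have hB : (list.zip (list.map (fun p => pvRankB list offset p))).foldl
      (fun d q => d.insert q.1 q.2) (PySem.Dict.empty : PySem.Dict String Int)
      = PySem.Dict.mk (pvT offset list) := by
    rw [pvZipSelfMap, List.foldl_map]
    simp only
    rw [pvFoldB_eval, pvT_eq_map_rank]
  show (_, _) = (_, _)
  rw [hB]
  exact Prod.ext (List.map_congr_left fun p hp => pvT_getD offset list p hp) rfl
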